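-- pv_equiv track=rewrite | github.com/rrdls/cde-ai-multi-agent | src/chunks/chunker.py | build_sliding_windows_with_pages
-- ===== SOURCE A (Python) =====
-- def build_sliding_windows_with_pages(
--     paragraphs_with_pages: list[tuple[str, int, bool]], window_size: int = 1
-- ) -> list[tuple[str, int]]:
--     """
--     Cria janelas deslizantes mantendo a página do primeiro parágrafo.
--     Linhas de tabela (is_table_row=True) viram janelas isoladas.
--     """
--     if window_size <= 0:
--         raise ValueError("window_size deve ser positivo")
--     if not paragraphs_with_pages:
--         return []
--
--     windows: list[tuple[str, int]] = []
--
--     def _flush_buffer(buffer: list[tuple[str, int]]) -> None: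
--         if not buffer:
--             return
--         if len(buffer) <= window_size:
--             windows.append(("\n\n".join(p for p, _ in buffer), buffer[0][1]))
--             return
--         for start in range(len(buffer) - window_size + 1):
--             window = buffer[start : start + window_size]
--             windows.append(("\n\n".join(p for p, _ in window), window[0][1]))
--
--     buffer: list[tuple[str, int]] = []
--     for paragraph, page_no, is_table_row in paragraphs_with_pages:
--         if is_table_row:
--             _flush_buffer(buffer)
--             buffer = []
--             windows.append((paragraph, page_no))
--         else:
--             buffer.append((paragraph, page_no))
--
--     _flush_buffer(buffer)
--     return windows
-- ===== SOURCE B (Python) =====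
-- def build_sliding_windows_with_pages(
--     paragraphs_with_pages: list[tuple[str, int, bool]], window_size: int = 1
-- ) -> list[tuple[str, int]]:
--     """Group-first re-implementation: partition into maximal non-table runs,
--     then emit windows per run (table rows pass through one by one)."""
--     if window_size <= 0:
--         raise ValueError("window_size deve ser positivo")
--     out: list[tuple[str, int]] = []
--     i, n = 0, len(paragraphs_with_pages)
--     while i < n:
--         text, page, is_table_row = paragraphs_with_pages[i]
--         if is_table_row:
--             out.append((text, page))
--             i += 1
--             continue
--         j = i
--         while j < n and not paragraphs_with_pages[j][2]:
--             j += 1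
--         run = [(t, p) for t, p, _ in paragraphs_with_pages[i:j]]
--         for s in range(max(1, len(run) - window_size + 1)):
--             win = run[s:s + window_size]
--             out.append(("\n\n".join(t for t, _ in win), win[0][1]))
--         i = j
--     return out
-- ===== Notes on version B (the rewrite author's own statement) =====
-- stated objective: alternative
-- what changed: B first partitions the input into maximal runs of non-table paragraphs (a scan with an inner run-collector) and then emits the windows of each run via a single max(1, L-w+1) formula, instead of A's stateful buffer-accumulate-and-flush with two separate flush branches.
import Mathlib
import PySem

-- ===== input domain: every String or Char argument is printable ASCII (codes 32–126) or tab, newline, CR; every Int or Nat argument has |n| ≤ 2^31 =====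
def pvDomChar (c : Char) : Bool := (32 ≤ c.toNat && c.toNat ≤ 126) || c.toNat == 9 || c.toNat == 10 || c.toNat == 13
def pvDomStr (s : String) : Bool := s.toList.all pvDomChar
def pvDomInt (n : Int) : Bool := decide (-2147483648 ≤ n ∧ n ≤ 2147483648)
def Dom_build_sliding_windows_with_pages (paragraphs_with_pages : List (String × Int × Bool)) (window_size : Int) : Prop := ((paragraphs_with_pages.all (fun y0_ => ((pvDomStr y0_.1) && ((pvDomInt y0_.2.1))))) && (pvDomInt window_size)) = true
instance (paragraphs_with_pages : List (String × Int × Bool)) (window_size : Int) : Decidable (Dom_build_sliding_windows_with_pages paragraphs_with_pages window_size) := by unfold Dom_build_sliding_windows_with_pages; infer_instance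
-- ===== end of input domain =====

-- B partitions the input into maximal non-table runs and emits each run's windows by a
-- closed max(1, L-w+1) count, instead of A's buffer-accumulate-and-flush; objective: alternative.


-- ===== PORT A =====
-- _flush_buffer: appends to `windows`. buffer[0][1] / window[0][1] are ported with headD;
-- those lists are nonempty wherever that code runs in Python, so headD is exact there.
def pvFlushA (ws : Int) (windows buffer : List (String × Int)) : List (String × Int) :=
  if buffer = [] then windows
  else if (buffer.length : Int) ≤ ws then
    windows ++ [(PySem.Str.join "\n\n" (buffer.map Prod.fst), (buffer.headD ("", 0)).2)]
  else
    (PySem.List.pyRange 0 ((buffer.length : Int) - ws + 1) 1).foldl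
      (fun acc start =>
        let window := PySem.List.slice buffer (some start) (some (start + ws))
        acc ++ [(PySem.Str.join "\n\n" (window.map Prod.fst), (window.headD ("", 0)).2)])
      windows

def pvStepA (ws : Int) (st : List (String × Int) × List (String × Int))
    (x : String × Int × Bool) : List (String × Int) × List (String × Int) :=
  if x.2.2 then (pvFlushA ws st.1 st.2 ++ [(x.1, x.2.1)], [])
  else (st.1, st.2 ++ [(x.1, x.2.1)])

def build_sliding_windows_with_pages (paragraphs_with_pages : List (String × Int × Bool)) (window_size : Int) : List (String × Int) :=
  if window_size ≤ 0 then []  -- Python raises ValueError here; excluded by Pre_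
  else if paragraphs_with_pages = [] then []
  else
    let st := paragraphs_with_pages.foldl (pvStepA window_size) ([], [])
    pvFlushA window_size st.1 st.2

-- ===== PORT B =====
-- windows of one run: range(max(1, L - w + 1)), window = run[s:s+w], page = win[0][1] (headD, run nonempty)
def pvRunWindows (ws : Int) (run : List (String × Int)) : List (String × Int) :=
  (PySem.List.pyRange 0 (max 1 ((run.length : Int) - ws + 1)) 1).map
    (fun s =>
      let win := PySem.List.slice run (some s) (some (s + ws))
      (PySem.Str.join "\n\n" (win.map Prod.fst), (win.headD ("", 0)).2))

-- the inner `while j < n and not ...[j][2]` scan: collect the maximal non-table run and the rest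
def pvTakeRun : List (String × Int × Bool) → List (String × Int) × List (String × Int × Bool)
  | [] => ([], [])
  | x :: rest =>
    if x.2.2 then ([], x :: rest)
    else
      let r := pvTakeRun rest
      ((x.1, x.2.1) :: r.1, r.2)

theorem pvTakeRun_snd_length_le : ∀ l : List (String × Int × Bool), (pvTakeRun l).2.length ≤ l.length
  | [] => le_refl _
  | x :: rest => by
    simp only [pvTakeRun]
    split
    · simp
    · exact le_trans (pvTakeRun_snd_length_le rest) (Nat.le_succ _)

-- the outer while loop over the remaining suffix
def pvAltGo (ws : Int) : List (String × Int × Bool) → List (String × Int)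
  | [] => []
  | x :: rest =>
    if x.2.2 then (x.1, x.2.1) :: pvAltGo ws rest
    else pvRunWindows ws ((x.1, x.2.1) :: (pvTakeRun rest).1) ++ pvAltGo ws (pvTakeRun rest).2
termination_by l => l.length
decreasing_by
  · simp only [List.length_cons]; omega
  · have := pvTakeRun_snd_length_le rest; simp only [List.length_cons]; omega

def build_sliding_windows_with_pages_alt (paragraphs_with_pages : List (String × Int × Bool)) (window_size : Int) : List (String × Int) :=
  if window_size ≤ 0 then []  -- Python raises ValueError here; excluded by Pre_
  else pvAltGo window_size paragraphs_with_pages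

-- ===== PRECONDITION & SPEC =====
-- A raises ValueError when window_size <= 0; Pre_ excludes exactly those inputs (B raises there too).
def Pre_build_sliding_windows_with_pages (paragraphs_with_pages : List (String × Int × Bool)) (window_size : Int) : Prop := 1 ≤ window_size
instance (paragraphs_with_pages : List (String × Int × Bool)) (window_size : Int) : Decidable (Pre_build_sliding_windows_with_pages paragraphs_with_pages window_size) := by unfold Pre_build_sliding_windows_with_pages; infer_instance

def pvWitness_build_sliding_windows_with_pages : (List (String × Int × Bool)) × Int :=
  ([("a", 1, false), ("b", 1, true), ("c", 2, false)], 1)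

def Spec_build_sliding_windows_with_pages (paragraphs_with_pages : List (String × Int × Bool)) (window_size : Int) (out : List (String × Int)) : Prop := out = build_sliding_windows_with_pages_alt paragraphs_with_pages window_size
instance (paragraphs_with_pages : List (String × Int × Bool)) (window_size : Int) (out : List (String × Int)) : Decidable (Spec_build_sliding_windows_with_pages paragraphs_with_pages window_size out) := by unfold Spec_build_sliding_windows_with_pages; infer_instance

-- ===== CLAIM (what is proved, stated in full; the proofs are below) =====
def Claim_equal_build_sliding_windows_with_pages : Prop := ∀ (paragraphs_with_pages : List (String × Int × Bool)) (window_size : Int), Dom_build_sliding_windows_with_pages paragraphs_with_pages window_size → Pre_build_sliding_windows_with_pages paragraphs_with_pages window_size → Spec_build_sliding_windows_with_pages paragraphs_with_pages window_size (build_sliding_windows_with_pages paragraphs_with_pages window_size)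

-- ===== LEMMAS AND PROOFS =====

-- flush only appends to `windows`
theorem pvFlushA_append (ws : Int) (w b : List (String × Int)) :
    pvFlushA ws w b = w ++ pvFlushA ws [] b := by
  unfold pvFlushA
  split
  · simp
  · split
    · simp
    · rw [PySem.List.foldl_append_singleton_eq_map, PySem.List.foldl_append_singleton_eq_map]
      simp

-- B's per-run windows coincide with A's flush on a nonempty run (needs 1 ≤ ws)
theorem pvRunWindows_eq_flush (ws : Int) (hws : 1 ≤ ws) (b : List (String × Int)) (hb : b ≠ []) :
    pvRunWindows ws b = pvFlushA ws [] b := by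
  unfold pvRunWindows pvFlushA
  rw [if_neg hb]
  by_cases h : (b.length : Int) ≤ ws
  · rw [if_pos h]
    have hmax : max 1 ((b.length : Int) - ws + 1) = 1 := by omega
    rw [hmax]
    have : PySem.List.pyRange 0 1 1 = [(0 : Int)] := by decide
    rw [this]
    simp only [List.map_cons, List.map_nil]
    have hsl : PySem.List.slice b (some 0) (some (0 + ws)) = b := by
      rw [zero_add, PySem.List.slice_zero_start, PySem.List.slice_to _ (by omega)]
      exact List.take_of_length_le (by omega)
    rw [hsl]
    simp
  · rw [if_neg h]
    rw [PySem.List.foldl_append_singleton_eq_map]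
    have hmax : max 1 ((b.length : Int) - ws + 1) = (b.length : Int) - ws + 1 := by omega
    rw [hmax]
    simp

-- accumulated windows are a prefix the loop only appends to
theorem pvFoldA_prefix (ws : Int) : ∀ (l : List (String × Int × Bool)) (w b : List (String × Int)),
    l.foldl (pvStepA ws) (w, b) = (w ++ (l.foldl (pvStepA ws) ([], b)).1, (l.foldl (pvStepA ws) ([], b)).2) := by
  intro l
  induction l with
  | nil => intro w b; simp
  | cons x rest ih =>
    intro w b
    rw [List.foldl_cons, List.foldl_cons]
    by_cases hx : x.2.2
    · rw [show pvStepA ws (w, b) x = (pvFlushA ws w b ++ [(x.1, x.2.1)], []) from by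
          simp [pvStepA, hx],
        show pvStepA ws ([], b) x = (pvFlushA ws [] b ++ [(x.1, x.2.1)], []) from by
          simp [pvStepA, hx]]
      rw [ih (pvFlushA ws w b ++ [(x.1, x.2.1)]) [], ih (pvFlushA ws [] b ++ [(x.1, x.2.1)]) []]
      rw [pvFlushA_append ws w b]
      simp
    · rw [show pvStepA ws (w, b) x = (w, b ++ [(x.1, x.2.1)]) from by simp [pvStepA, hx],
        show pvStepA ws ([], b) x = (([] : List (String × Int)), b ++ [(x.1, x.2.1)]) from by
          simp [pvStepA, hx]]
      exact ih w (b ++ [(x.1, x.2.1)])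

-- pvAltGo characterised through pvTakeRun (one unfolding step, no induction)
theorem pvAltGo_eq_takeRun (ws : Int) (hws : 1 ≤ ws) (l : List (String × Int × Bool)) :
    pvAltGo ws l = pvFlushA ws [] (pvTakeRun l).1 ++ pvAltGo ws (pvTakeRun l).2 := by
  match l with
  | [] => simp [pvAltGo, pvTakeRun, pvFlushA]
  | x :: rest =>
    by_cases hx : x.2.2
    · simp [pvAltGo, pvTakeRun, hx, pvFlushA]
    · simp only [pvAltGo, pvTakeRun, hx]
      rw [pvRunWindows_eq_flush ws hws _ (by simp)]
      simp

-- main loop invariant: A's fold-then-flush starting from pending buffer b equals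
-- flushing b ++ (first run) then continuing B-style on the remainder
theorem pvMain (ws : Int) (hws : 1 ≤ ws) : ∀ (l : List (String × Int × Bool)) (b : List (String × Int)),
    pvFlushA ws (l.foldl (pvStepA ws) ([], b)).1 (l.foldl (pvStepA ws) ([], b)).2
      = pvFlushA ws [] (b ++ (pvTakeRun l).1) ++ pvAltGo ws (pvTakeRun l).2 := by
  intro l
  induction l with
  | nil => intro b; simp [pvTakeRun, pvAltGo]
  | cons x rest ih =>
    intro b
    rw [List.foldl_cons]
    by_cases hx : x.2.2
    · rw [show pvStepA ws ([], b) x = (pvFlushA ws [] b ++ [(x.1, x.2.1)], []) from by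
          simp [pvStepA, hx]]
      rw [pvFoldA_prefix ws rest (pvFlushA ws [] b ++ [(x.1, x.2.1)]) []]
      rw [pvFlushA_append ws (pvFlushA ws [] b ++ [(x.1, x.2.1)] ++
            (rest.foldl (pvStepA ws) ([], [])).1) (rest.foldl (pvStepA ws) ([], [])).2]
      rw [List.append_assoc, List.append_assoc,
        ← pvFlushA_append ws (rest.foldl (pvStepA ws) ([], [])).1
            (rest.foldl (pvStepA ws) ([], [])).2]
      have hih := ih []
      simp only [List.nil_append] at hih
      rw [hih]
      rw [show pvTakeRun (x :: rest) = ([], x :: rest) from by simp [pvTakeRun, hx]]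
      rw [show pvAltGo ws (x :: rest) = (x.1, x.2.1) :: pvAltGo ws rest from by
          simp [pvAltGo, hx]]
      rw [pvAltGo_eq_takeRun ws hws rest]
      simp
    · rw [show pvStepA ws ([], b) x = (([] : List (String × Int)), b ++ [(x.1, x.2.1)]) from by
          simp [pvStepA, hx]]
      rw [ih (b ++ [(x.1, x.2.1)])]
      simp [pvTakeRun, hx]

-- ===== VERDICT (by name: the statement is the Claim_ definition above) =====
theorem build_sliding_windows_with_pages_spec : Claim_equal_build_sliding_windows_with_pages := by
  intro l ws _ hpre
  unfold Pre_build_sliding_windows_with_pages at hpre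
  unfold Spec_build_sliding_windows_with_pages build_sliding_windows_with_pages
    build_sliding_windows_with_pages_alt
  have h0 : ¬ (ws ≤ 0) := by omega
  rw [if_neg h0, if_neg h0]
  match l with
  | [] => simp [pvAltGo]
  | x :: rest =>
    rw [if_neg (by simp : ¬ (x :: rest = ([] : List (String × Int × Bool))))]
    have h := pvMain ws hpre (x :: rest) []
    simp only [List.nil_append] at h
    rw [h, ← pvAltGo_eq_takeRun ws hpre]
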